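-- pv_equiv track=rewrite | github.com/TranTienDat265/python | sobacthang.py | sbt
-- ===== SOURCE A (Python) =====
-- def sbt(n):
--     s = str(n)
--     if len(s) <=1:
--         return False
--     dem=0
--     for i in range(len(s)-1):
--         so1 = int(s[i])
--         so2 = int(s[i+1])
--         if so1<so2:
--             dem+=1
--     if dem == len(s)-1:
--         return True
--     else:
--         return False
-- ===== SOURCE B (Python) =====
-- def sbt(n):
--     digits = [int(c) for c in str(n)]
--     if len(digits) <= 1:
--         return False
--     return digits == sorted(digits) and len(set(digits)) == len(digits)
-- ===== Notes on version B (the rewrite author's own statement) =====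
-- stated objective: simpler
-- what changed: Replaces A's index loop counting adjacent increasing pairs (and comparing the count to len-1) with a whole-list check: the digit list equals its sorted order and has no duplicates.
import Mathlib
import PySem

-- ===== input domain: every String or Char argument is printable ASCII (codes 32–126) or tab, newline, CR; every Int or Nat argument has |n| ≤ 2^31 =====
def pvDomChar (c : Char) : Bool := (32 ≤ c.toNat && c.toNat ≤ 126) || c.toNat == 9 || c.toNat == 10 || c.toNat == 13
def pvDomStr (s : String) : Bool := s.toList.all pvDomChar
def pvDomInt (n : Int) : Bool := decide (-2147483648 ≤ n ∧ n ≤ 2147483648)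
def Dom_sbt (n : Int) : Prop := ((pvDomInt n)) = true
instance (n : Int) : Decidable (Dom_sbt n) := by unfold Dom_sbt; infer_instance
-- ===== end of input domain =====

-- B replaces A's adjacent-pair counting loop with 'the digit list equals its sorted order and has no duplicates' (simpler, not faster).

-- ===== PORT A =====
-- int(s[i]) for one character of str(n); under Pre_sbt (0 ≤ n) every character is a digit, so ofChars? is always 'some' and the default never fires.
def pvDigit (c : Char) : Int := (PySem.Int.ofChars? [c]).getD 0

def sbt (n : Int) : Bool :=
  let s := PySem.Int.toChars n
  if (s.length : Int) ≤ 1 then false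
  else
    let dem := (PySem.List.pyRange 0 ((s.length : Int) - 1) 1).foldl
      (fun dem i =>
        let so1 := pvDigit (PySem.List.pyGetD s i ' ')
        let so2 := pvDigit (PySem.List.pyGetD s (i + 1) ' ')
        if so1 < so2 then dem + 1 else dem) (0 : Int)
    if dem = (s.length : Int) - 1 then true else false

-- ===== PORT B =====
def sbt_alt (n : Int) : Bool :=
  let digits := (PySem.Int.toChars n).map pvDigit
  if (digits.length : Int) ≤ 1 then false
  else decide (digits = PySem.List.sorted digits (fun x => x))
       && decide ((PySem.Set.ofList digits).length = digits.length)

-- ===== PRECONDITION & SPEC =====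
-- Pre_ excludes negative n: str(n) then starts with '-' and A raises ValueError at int('-') (B raises the same ValueError).
def Pre_sbt (n : Int) : Prop := 0 ≤ n
instance (n : Int) : Decidable (Pre_sbt n) := by unfold Pre_sbt; infer_instance
def pvWitness_sbt : Int := (123)

def Spec_sbt (n : Int) (out : Bool) : Prop := out = sbt_alt n
instance (n : Int) (out : Bool) : Decidable (Spec_sbt n out) := by unfold Spec_sbt; infer_instance

-- ===== CLAIM (what is proved, stated in full; the proofs are below) =====
def Claim_equal_sbt : Prop := ∀ (n : Int), Dom_sbt n → Pre_sbt n → Spec_sbt n (sbt n)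

-- ===== LEMMAS AND PROOFS =====

-- A's counting loop is a countP
theorem foldl_if_count {α : Type} (p : α → Prop) [DecidablePred p] (l : List α) (acc : Int) :
    l.foldl (fun dem i => if p i then dem + 1 else dem) acc
      = acc + l.countP (fun i => decide (p i)) := by
  induction l generalizing acc with
  | nil => simp
  | cons a l ih =>
    simp only [List.foldl_cons, List.countP_cons, ih]
    by_cases h : p a
    · simp [h]
      omega
    · simp [h]

theorem ofList_sublist {α : Type} [BEq α] [LawfulBEq α] (l : List α) :
    (PySem.Set.ofList l).Sublist l := by
  induction l with
  | nil => simp [PySem.Set.ofList_nil]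
  | cons a l ih =>
    rw [PySem.Set.ofList_cons]
    refine List.Sublist.cons₂ a (List.Sublist.trans ?_ ih)
    simp [PySem.Set.discard, List.filter_sublist]

theorem len_ofList_iff {α : Type} [BEq α] [LawfulBEq α] (l : List α) :
    (PySem.Set.ofList l).length = l.length ↔ l.Nodup := by
  constructor
  · intro h
    have he := (ofList_sublist l).eq_of_length h
    rw [← he]; exact PySem.Set.nodup_ofList l
  · intro h; rw [PySem.Set.ofList_eq_self_of_nodup l h]

theorem eq_sorted_iff (l : List Int) :
    l = PySem.List.sorted l (fun x => x) ↔ l.Pairwise (· ≤ ·) := by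
  constructor
  · intro h
    have hp := PySem.List.sorted_pairwise l (fun x => x)
    rw [← h] at hp; exact hp
  · intro h; exact (PySem.List.sorted_eq_self_of_pairwise l (fun x => x) h).symm

-- adjacent strict increase ↔ pairwise strict increase
theorem adj_iff_pairwise (l : List Int) (d : Int) :
    (∀ k, k < l.length - 1 → l.getD k d < l.getD (k + 1) d) ↔ l.Pairwise (· < ·) := by
  constructor
  · intro h
    rw [List.pairwise_iff_getElem]
    intro i j hi hj hij
    have key : ∀ j, i < j → j < l.length → l[i]'hi < l.getD j d := by
      intro j
      induction j with
      | zero => omega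
      | succ m ih =>
        intro him hm
        have hadj : l.getD m d < l.getD (m + 1) d := h m (by omega)
        by_cases he : i = m
        · subst he
          rw [List.getD_eq_getElem l d (by omega : i < l.length)] at hadj
          exact hadj
        · exact lt_trans (ih (by omega) (by omega)) hadj
    have := key j hij hj
    rwa [List.getD_eq_getElem l d hj] at this
  · intro h k hk
    rw [List.pairwise_iff_getElem] at h
    rw [List.getD_eq_getElem l d (by omega : k < l.length),
        List.getD_eq_getElem l d (by omega : k + 1 < l.length)]
    exact h k (k + 1) (by omega) (by omega) (by omega)

theorem pairwise_le_nodup_iff (l : List Int) :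
    (l.Pairwise (· ≤ ·) ∧ l.Nodup) ↔ l.Pairwise (· < ·) := by
  constructor
  · rintro ⟨hle, hne⟩
    exact (hle.and hne).imp (fun h => lt_of_le_of_ne h.1 h.2)
  · intro h
    exact ⟨h.imp le_of_lt, h.imp ne_of_lt⟩

-- the list-level heart of the equivalence, over the digit list ds
theorem core_iff (ds : List Int) (d : Int) (h2 : 2 ≤ ds.length) :
    ((PySem.List.pyRange 0 ((ds.length : Int) - 1) 1).foldl
        (fun dem i =>
          if PySem.List.pyGetD ds i d < PySem.List.pyGetD ds (i + 1) d then dem + 1 else dem)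
        (0 : Int) = (ds.length : Int) - 1)
    ↔ (ds = PySem.List.sorted ds (fun x => x) ∧ (PySem.Set.ofList ds).length = ds.length) := by
  rw [foldl_if_count (fun i => PySem.List.pyGetD ds i d < PySem.List.pyGetD ds (i + 1) d),
      PySem.List.pyRange_one, List.countP_map]
  have hm : ((ds.length : Int) - 1 - 0).toNat = ds.length - 1 := by omega
  rw [hm]
  set m := ds.length - 1 with hmdef
  set p' := ((fun i => decide (PySem.List.pyGetD ds i d < PySem.List.pyGetD ds (i + 1) d)) ∘
      fun k : Nat => (0 : Int) + ↑k) with hp'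
  have hle : List.countP p' (List.range m) ≤ m := by
    have := List.countP_le_length (p := p') (l := List.range m)
    simpa using this
  have key : (List.countP p' (List.range m) = m) ↔ ds.Pairwise (· < ·) := by
    rw [← adj_iff_pairwise ds d]
    constructor
    · intro h k hk
      have hall := List.countP_eq_length.mp
        (by rw [List.length_range]; exact h)
      have hk' := hall k (List.mem_range.mpr hk)
      simp only [hp', Function.comp, zero_add, decide_eq_true_eq] at hk'
      have c1 : PySem.List.pyGetD ds (↑k : Int) d = ds.getD k d :=
        PySem.List.pyGetD_natCast ds k d
      have c2 : PySem.List.pyGetD ds ((↑k : Int) + 1) d = ds.getD (k + 1) d := by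
        have : ((↑k : Int) + 1) = ((k + 1 : Nat) : Int) := by push_cast; ring
        rw [this]; exact PySem.List.pyGetD_natCast ds (k + 1) d
      rwa [c1, c2] at hk'
    · intro h
      have : ∀ a ∈ List.range m, p' a = true := by
        intro a ha
        have hk := List.mem_range.mp ha
        simp only [hp', Function.comp, zero_add, decide_eq_true_eq]
        have c1 : PySem.List.pyGetD ds (↑a : Int) d = ds.getD a d :=
          PySem.List.pyGetD_natCast ds a d
        have c2 : PySem.List.pyGetD ds ((↑a : Int) + 1) d = ds.getD (a + 1) d := by
          have : ((↑a : Int) + 1) = ((a + 1 : Nat) : Int) := by push_cast; ring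
          rw [this]; exact PySem.List.pyGetD_natCast ds (a + 1) d
        rw [c1, c2]
        exact h a hk
      have := List.countP_eq_length.mpr this
      rwa [List.length_range] at this
  rw [eq_sorted_iff, len_ofList_iff, pairwise_le_nodup_iff, ← key]
  constructor
  · intro h; omega
  · intro h; omega

-- the two ports agree on every Int (on Pre_ this is what the Pythons compute)
theorem sbt_eq_alt (n : Int) : sbt n = sbt_alt n := by
  simp only [sbt, sbt_alt]
  by_cases h : ((PySem.Int.toChars n).length : Int) ≤ 1
  · simp [h]
  · have hlenmap : ((PySem.Int.toChars n).map pvDigit).length = (PySem.Int.toChars n).length :=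
      List.length_map ..
    rw [hlenmap, if_neg h, if_neg h]
    have h2 : 2 ≤ ((PySem.Int.toChars n).map pvDigit).length := by
      rw [hlenmap]; omega
    have hcore := core_iff ((PySem.Int.toChars n).map pvDigit) (pvDigit ' ') h2
    rw [hlenmap] at hcore
    have hbody :
        (fun (dem : Int) (i : Int) =>
            if pvDigit (PySem.List.pyGetD (PySem.Int.toChars n) i ' ')
                < pvDigit (PySem.List.pyGetD (PySem.Int.toChars n) (i + 1) ' ')
            then dem + 1 else dem)
        = (fun (dem : Int) (i : Int) =>
            if PySem.List.pyGetD ((PySem.Int.toChars n).map pvDigit) i (pvDigit ' ')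
                < PySem.List.pyGetD ((PySem.Int.toChars n).map pvDigit) (i + 1) (pvDigit ' ')
            then dem + 1 else dem) := by
      funext dem i
      rw [PySem.List.pyGetD_map pvDigit (PySem.Int.toChars n) i ' ',
          PySem.List.pyGetD_map pvDigit (PySem.Int.toChars n) (i + 1) ' ']
    rw [hbody]
    by_cases hd :
        ((PySem.List.pyRange 0 (((PySem.Int.toChars n).length : Int) - 1) 1).foldl
          (fun dem i =>
            if PySem.List.pyGetD ((PySem.Int.toChars n).map pvDigit) i (pvDigit ' ')
                < PySem.List.pyGetD ((PySem.Int.toChars n).map pvDigit) (i + 1) (pvDigit ' ')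
            then dem + 1 else dem) (0 : Int)) = ((PySem.Int.toChars n).length : Int) - 1
    · obtain ⟨hs, hn⟩ := hcore.mp hd
      rw [if_pos hd, decide_eq_true hs, decide_eq_true hn]
      rfl
    · have hpq : ¬((PySem.Int.toChars n).map pvDigit =
          PySem.List.sorted ((PySem.Int.toChars n).map pvDigit) (fun x => x) ∧
          (PySem.Set.ofList ((PySem.Int.toChars n).map pvDigit)).length
            = ((PySem.Int.toChars n).length)) := fun hpq => hd (hcore.mpr hpq)
      rw [if_neg hd]
      by_cases hsP : (PySem.Int.toChars n).map pvDigit =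
          PySem.List.sorted ((PySem.Int.toChars n).map pvDigit) (fun x => x)
      · have hQ : ¬((PySem.Set.ofList ((PySem.Int.toChars n).map pvDigit)).length
            = ((PySem.Int.toChars n).length)) := fun hq => hpq ⟨hsP, hq⟩
        rw [decide_eq_true hsP, decide_eq_false hQ]
        rfl
      · rw [decide_eq_false hsP, Bool.false_and]

-- ===== VERDICT (by name: the statement is the Claim_ definition above) =====
theorem sbt_spec : Claim_equal_sbt := by
  intro n _ _
  exact sbt_eq_alt n
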